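-- pv_equiv track=rewrite | github.com/ShiIiA/recommender-system-project | src/models/llm_enhancer.py | _get_meal_type
-- ===== SOURCE A (Python) =====
-- from typing import Dict, List, Any
--
-- def _get_meal_type(tags: List[str]) -> str:
--     """Get meal type from tags"""
--     if any('breakfast' in tag.lower() for tag in tags):
--         return "breakfast"
--     elif any('lunch' in tag.lower() for tag in tags):
--         return "lunch"
--     elif any('dinner' in tag.lower() for tag in tags):
--         return "dinner"
--     return "meal"
-- ===== SOURCE B (Python) =====
-- def _get_meal_type(tags):
--     """Get meal type from tags (single pass accumulating which keywords occur)."""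
--     fb = fl = fd = False
--     for tag in tags:
--         t = tag.lower()
--         fb = fb or 'breakfast' in t
--         fl = fl or 'lunch' in t
--         fd = fd or 'dinner' in t
--     if fb:
--         return "breakfast"
--     if fl:
--         return "lunch"
--     if fd:
--         return "dinner"
--     return "meal"
-- ===== Notes on version B (the rewrite author's own statement) =====
-- stated objective: alternative
-- what changed: Replaces the three separate early-exit any() scans (each re-lowercasing every tag) with one pass over the tags that lowercases each tag once and accumulates three found-flags, followed by a priority check.
import Mathlib
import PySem

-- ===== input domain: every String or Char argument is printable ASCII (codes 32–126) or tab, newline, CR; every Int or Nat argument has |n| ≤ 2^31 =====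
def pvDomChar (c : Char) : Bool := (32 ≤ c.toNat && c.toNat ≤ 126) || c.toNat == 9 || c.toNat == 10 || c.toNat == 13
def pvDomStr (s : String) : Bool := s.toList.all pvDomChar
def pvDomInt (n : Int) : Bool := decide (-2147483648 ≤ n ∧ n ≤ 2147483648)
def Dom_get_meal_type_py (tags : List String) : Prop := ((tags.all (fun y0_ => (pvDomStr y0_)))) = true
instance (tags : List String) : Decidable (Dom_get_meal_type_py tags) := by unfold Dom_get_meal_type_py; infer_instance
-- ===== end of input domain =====

-- B replaces A's three separate early-exit any() scans with one pass that accumulates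
-- three found-flags, then a priority check (objective: alternative decomposition).


-- ===== PORT A =====
def get_meal_type_py (tags : List String) : String :=
  if tags.any (fun tag => PySem.Str.isIn "breakfast" (PySem.Str.lower tag)) then "breakfast"
  else if tags.any (fun tag => PySem.Str.isIn "lunch" (PySem.Str.lower tag)) then "lunch"
  else if tags.any (fun tag => PySem.Str.isIn "dinner" (PySem.Str.lower tag)) then "dinner"
  else "meal"

-- ===== PORT B =====
def get_meal_type_py_alt (tags : List String) : String :=
  let st := tags.foldl (fun (acc : Bool × Bool × Bool) tag =>
      let t := PySem.Str.lower tag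
      (acc.1 || PySem.Str.isIn "breakfast" t,
       acc.2.1 || PySem.Str.isIn "lunch" t,
       acc.2.2 || PySem.Str.isIn "dinner" t)) (false, false, false)
  if st.1 then "breakfast"
  else if st.2.1 then "lunch"
  else if st.2.2 then "dinner"
  else "meal"

-- ===== PRECONDITION & SPEC =====
def Spec_get_meal_type_py (tags : List String) (out : String) : Prop := out = get_meal_type_py_alt tags
instance (tags : List String) (out : String) : Decidable (Spec_get_meal_type_py tags out) := by unfold Spec_get_meal_type_py; infer_instance

-- ===== CLAIM (what is proved, stated in full; the proofs are below) =====
def Claim_equal_get_meal_type_py : Prop := ∀ (tags : List String), Dom_get_meal_type_py tags → Spec_get_meal_type_py tags (get_meal_type_py tags)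

-- ===== LEMMAS AND PROOFS =====
theorem pv_fold_flags (tags : List String) (a b c : Bool) :
    tags.foldl (fun (acc : Bool × Bool × Bool) tag =>
      let t := PySem.Str.lower tag
      (acc.1 || PySem.Str.isIn "breakfast" t,
       acc.2.1 || PySem.Str.isIn "lunch" t,
       acc.2.2 || PySem.Str.isIn "dinner" t)) (a, b, c)
    = (a || tags.any (fun tag => PySem.Str.isIn "breakfast" (PySem.Str.lower tag)),
       b || tags.any (fun tag => PySem.Str.isIn "lunch" (PySem.Str.lower tag)),
       c || tags.any (fun tag => PySem.Str.isIn "dinner" (PySem.Str.lower tag))) := by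
  induction tags generalizing a b c with
  | nil => simp
  | cons hd tl ih =>
      simp only [List.foldl_cons, List.any_cons]
      rw [ih]
      simp [Bool.or_assoc]

theorem get_meal_type_py_spec_aux (tags : List String) :
    get_meal_type_py tags = get_meal_type_py_alt tags := by
  unfold get_meal_type_py get_meal_type_py_alt
  simp only [pv_fold_flags, Bool.false_or]

-- ===== VERDICT (by name: the statement is the Claim_ definition above) =====
theorem get_meal_type_py_spec : Claim_equal_get_meal_type_py := by
  intro tags _
  exact get_meal_type_py_spec_aux tags
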